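-- pv_equiv track=rewrite | github.com/xlax007/Collection-of-Algorithms | Single_Push.py | imposible
-- ===== SOURCE A (Python) =====
-- def imposible(arrayA, arrayB):
--     checker = []
--     for i in range(len(arrayA)):
--         if int(arrayA[i]) != int(arrayB[i]):
--             checker.append(i)
--
--     for i in range(len(checker)):
--         if (i+1) < len(checker):
--             if (checker[i]+1) != (checker[i+1]):
--                 return True
--
--     return False
-- ===== SOURCE B (Python) =====
-- def imposible(arrayA, arrayB):
--     count = 0
--     first = 0
--     last = 0
--     for i in range(len(arrayA)):
--         if int(arrayA[i]) != int(arrayB[i]):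
--             if count == 0:
--                 first = i
--             last = i
--             count += 1
--     return count > 0 and (last - first + 1) != count
-- ===== Notes on version B (the rewrite author's own statement) =====
-- stated objective: simpler
-- what changed: Replaces the built list of differing indices plus a second adjacency-scanning loop by a single pass that maintains only the count, first and last differing index, using that sorted indices are contiguous iff last-first+1 == count.
import Mathlib
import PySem

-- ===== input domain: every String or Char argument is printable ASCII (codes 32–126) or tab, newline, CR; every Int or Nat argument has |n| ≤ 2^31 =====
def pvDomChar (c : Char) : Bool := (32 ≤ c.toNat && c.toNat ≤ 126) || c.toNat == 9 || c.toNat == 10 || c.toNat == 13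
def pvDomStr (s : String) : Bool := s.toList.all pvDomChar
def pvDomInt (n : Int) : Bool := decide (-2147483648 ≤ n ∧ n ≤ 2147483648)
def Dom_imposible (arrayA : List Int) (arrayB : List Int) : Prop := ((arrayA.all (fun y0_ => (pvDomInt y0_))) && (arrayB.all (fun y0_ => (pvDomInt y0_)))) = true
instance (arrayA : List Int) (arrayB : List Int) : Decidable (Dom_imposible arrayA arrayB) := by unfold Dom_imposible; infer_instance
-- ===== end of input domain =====

-- B replaces A's list of differing indices + second adjacency scan by one O(1)-space pass
-- keeping count/first/last (objective: simpler).

-- ===== PORT A =====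
-- second loop of A: 'for i in range(len(checker)): if i+1<len: if checker[i]+1 != checker[i+1]: return True'
-- ported as the same left-to-right scan of adjacent pairs with early True (structural recursion)
def pvGapScan : List Int → Bool
  | a :: b :: rest => if a + 1 ≠ b then true else pvGapScan (b :: rest)
  | _ => false

def imposible (arrayA : List Int) (arrayB : List Int) : Bool :=
  let checker := (PySem.List.pyRange 0 arrayA.length 1).foldl
    (fun acc i =>
      if PySem.List.pyGetD arrayA i 0 ≠ PySem.List.pyGetD arrayB i 0 then acc ++ [i] else acc) []
  pvGapScan checker

-- ===== PORT B =====
def imposible_alt (arrayA : List Int) (arrayB : List Int) : Bool :=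
  let st := (PySem.List.pyRange 0 arrayA.length 1).foldl
    (fun (s : Int × Int × Int) i =>
      if PySem.List.pyGetD arrayA i 0 ≠ PySem.List.pyGetD arrayB i 0 then
        (s.1 + 1, (if s.1 = 0 then i else s.2.1), i)
      else s) (0, 0, 0)
  decide (st.1 > 0) && decide (st.2.2 - st.2.1 + 1 ≠ st.1)

-- ===== PRECONDITION & SPEC =====
-- Pre_ excludes exactly the inputs where Python A raises IndexError: arrayB shorter than arrayA.
def Pre_imposible (arrayA : List Int) (arrayB : List Int) : Prop := arrayA.length ≤ arrayB.length
instance (arrayA : List Int) (arrayB : List Int) : Decidable (Pre_imposible arrayA arrayB) := by unfold Pre_imposible; infer_instance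
def pvWitness_imposible : List Int × List Int := ([1, 2, 3], [1, 5, 3])

def Spec_imposible (arrayA : List Int) (arrayB : List Int) (out : Bool) : Prop := out = imposible_alt arrayA arrayB
instance (arrayA : List Int) (arrayB : List Int) (out : Bool) : Decidable (Spec_imposible arrayA arrayB out) := by unfold Spec_imposible; infer_instance

-- ===== CLAIM (what is proved, stated in full; the proofs are below) =====
def Claim_equal_imposible : Prop := ∀ (arrayA : List Int) (arrayB : List Int), Dom_imposible arrayA arrayB → Pre_imposible arrayA arrayB → Spec_imposible arrayA arrayB (imposible arrayA arrayB)

-- ===== LEMMAS AND PROOFS =====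

-- folding a function that skips non-p elements = folding the filtered list
theorem pvFoldlIfFilter {σ : Type} (p : Int → Bool) (g : σ → Int → σ) :
    ∀ (l : List Int) (s : σ),
      l.foldl (fun s i => if p i then g s i else s) s = (l.filter p).foldl g s := by
  intro l
  induction l with
  | nil => intro s; rfl
  | cons x xs ih =>
    intro s
    by_cases h : p x = true
    · simp [h, ih]
    · simp [h, ih]

-- B's fold state once count is positive: count adds length, first is kept, last = getLast
theorem pvStateRun (g : Int × Int × Int → Int → Int × Int × Int)
    (hg : ∀ s i, g s i = (s.1 + 1, (if s.1 = 0 then i else s.2.1), i)) :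
    ∀ (c : List Int) (cnt f la : Int), 0 < cnt →
      c.foldl g (cnt, f, la) = (cnt + c.length, f, c.getLast?.getD la) := by
  intro c
  induction c with
  | nil => intro cnt f la h; simp
  | cons x xs ih =>
    intro cnt f la h
    have hx : g (cnt, f, la) x = (cnt + 1, f, x) := by
      rw [hg]; simp [show cnt ≠ 0 by omega]
    rw [List.foldl_cons, hx, ih (cnt + 1) f x (by omega)]
    cases xs with
    | nil => simp
    | cons y ys =>
      cases hz : (y :: ys).getLast? with
      | none => simp at hz
      | some z => simp [List.getLast?_cons_cons, hz]; omega

-- characterization of B's whole fold on the filtered list c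
theorem pvStateChar (g : Int × Int × Int → Int → Int × Int × Int)
    (hg : ∀ s i, g s i = (s.1 + 1, (if s.1 = 0 then i else s.2.1), i)) (c : List Int) :
    c.foldl g (0, 0, 0) =
      (if c = [] then (0, 0, 0)
       else ((c.length : Int), c.head?.getD 0, c.getLast?.getD 0)) := by
  cases c with
  | nil => simp
  | cons x xs =>
    have hx : g (0, 0, 0) x = (1, x, x) := by rw [hg]; simp
    rw [List.foldl_cons, hx, pvStateRun g hg xs 1 x x (by omega)]
    cases xs with
    | nil => simp
    | cons y ys =>
      cases hz : (y :: ys).getLast? with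
      | none => simp at hz
      | some z => simp [List.getLast?_cons_cons, hz]; omega

-- in a strictly increasing Int list, the last element is at least head + length - 1
theorem pvLastGe : ∀ (x : Int) (xs : List Int), (x :: xs).Pairwise (· < ·) →
    x + xs.length ≤ (x :: xs).getLast?.getD 0 := by
  intro x xs
  induction xs generalizing x with
  | nil => intro _; simp
  | cons y ys ih =>
    intro hp
    have hxy : x < y := (List.pairwise_cons.mp hp).1 y (by simp)
    have hys : (y :: ys).Pairwise (· < ·) := (List.pairwise_cons.mp hp).2
    rw [List.getLast?_cons_cons]
    cases hz : (y :: ys).getLast? with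
    | none => simp at hz
    | some z =>
      have h2 : y + (ys.length : Int) ≤ z := by
        have := ih y hys
        rw [hz] at this
        simpa using this
      simp only [List.length_cons, Option.getD_some]
      push_cast
      omega

-- the adjacency scan on a strictly increasing nonempty list is false iff span = count
theorem pvGapScanChar : ∀ (c : List Int), c.Pairwise (· < ·) → c ≠ [] →
    pvGapScan c = decide (c.getLast?.getD 0 - c.head?.getD 0 + 1 ≠ (c.length : Int)) := by
  intro c
  induction c with
  | nil => intro _ hne; exact absurd rfl hne
  | cons a xs ih =>
    intro h hne
    cases xs with
    | nil => simp [pvGapScan]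
    | cons b rest =>
      have hab : a < b := (List.pairwise_cons.mp h).1 b (by simp)
      have hbs : (b :: rest).Pairwise (· < ·) := (List.pairwise_cons.mp h).2
      have ⟨z, hz⟩ : ∃ z, (b :: rest).getLast? = some z := by
        cases hz : (b :: rest).getLast? with
        | none => simp at hz
        | some z => exact ⟨z, rfl⟩
      by_cases hgap : a + 1 = b
      · have hrec := ih hbs (by simp)
        simp only [pvGapScan, hgap, hrec, List.getLast?_cons_cons,
          List.head?_cons, Option.getD_some, List.length_cons]
        rw [if_neg (by simp), hz]
        simp only [Option.getD_some, decide_eq_decide]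
        push_cast
        omega
      · have hge := pvLastGe b rest hbs
        rw [hz] at hge
        simp only [pvGapScan, if_pos (by exact fun hEq => hgap hEq), List.getLast?_cons_cons,
          List.head?_cons, Option.getD_some, List.length_cons]
        rw [hz]
        rw [eq_comm, decide_eq_true_iff]
        simp only [Option.getD_some] at *
        push_cast at *
        omega

-- ===== VERDICT (by name: the statement is the Claim_ definition above) =====
theorem imposible_spec : Claim_equal_imposible := by
  intro arrayA arrayB _ _
  unfold Spec_imposible imposible imposible_alt
  set p : Int → Bool := fun i => decide (PySem.List.pyGetD arrayA i 0 ≠ PySem.List.pyGetD arrayB i 0) with hp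
  have hfun1 : (fun (acc : List Int) (i : Int) =>
      if PySem.List.pyGetD arrayA i 0 ≠ PySem.List.pyGetD arrayB i 0 then acc ++ [i] else acc) =
      (fun acc i => if p i then acc ++ [i] else acc) := by
    funext acc i
    by_cases hd : PySem.List.pyGetD arrayA i 0 ≠ PySem.List.pyGetD arrayB i 0 <;> simp [hd, hp]
  have hfun2 : (fun (s : Int × Int × Int) (i : Int) =>
      if PySem.List.pyGetD arrayA i 0 ≠ PySem.List.pyGetD arrayB i 0 then
        (s.1 + 1, (if s.1 = 0 then i else s.2.1), i) else s) =
      (fun (s : Int × Int × Int) i => if p i then (s.1 + 1, (if s.1 = 0 then i else s.2.1), i) else s) := by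
    funext s i
    by_cases hd : PySem.List.pyGetD arrayA i 0 ≠ PySem.List.pyGetD arrayB i 0 <;> simp [hd, hp]
  simp only [hfun1, hfun2]
  rw [pvFoldlIfFilter p, pvFoldlIfFilter p]
  have hApp := PySem.List.foldl_append_singleton_eq_map
      (l := (PySem.List.pyRange 0 arrayA.length 1).filter p) (f := fun (i : Int) => i)
      (acc := ([] : List Int))
  simp only [List.map_id', List.nil_append] at hApp
  rw [hApp]
  set c := (PySem.List.pyRange 0 arrayA.length 1).filter p with hc
  have hpw : c.Pairwise (· < ·) :=
    List.Pairwise.filter _ (PySem.List.pairwise_lt_pyRange_one 0 arrayA.length)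
  rw [pvStateChar _ (fun s i => rfl) c]
  by_cases hne : c = []
  · simp [hne, pvGapScan]
  · rw [if_neg hne, pvGapScanChar c hpw hne]
    have hlen : 0 < c.length := List.length_pos_iff.mpr hne
    simp only []
    by_cases hs : c.getLast?.getD 0 - c.head?.getD 0 + 1 ≠ (c.length : Int)
    · simp [hs]; omega
    · simp [hs]

theorem pv_witness_ok : Dom_imposible pvWitness_imposible.1 pvWitness_imposible.2 ∧ Pre_imposible pvWitness_imposible.1 pvWitness_imposible.2 := by decide
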